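-- pv_equiv track=rewrite | github.com/mvandervelden/advent-of-code | 2025/6.py | parse_worksheet
-- ===== SOURCE A (Python) =====
-- def parse_worksheet(lines):
--     """Parse worksheet left-to-right, numbers arranged vertically."""
--     # Pad all lines to the same length
--     max_len = max(len(line) for line in lines)
--     padded_lines = [line.ljust(max_len) for line in lines]
--
--     problems = []
--     col = 0
--
--     while col < max_len:
--         # Skip spaces
--         while col < max_len and all(line[col] == ' ' for line in padded_lines):
--             col += 1
--
--         if col >= max_len:
--             break
--
--         # Find the width of this problem (until next all-space column)
--         start_col = col
--         while col < max_len and not all(line[col] == ' ' for line in padded_lines):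
--             col += 1
--
--         # Extract the problem from columns start_col to col
--         numbers = []
--         for line in padded_lines[:-1]:
--             value = line[start_col:col].strip()
--             if value:
--                 numbers.append(int(value))
--
--         operator = padded_lines[-1][start_col:col].strip()
--
--         if numbers and operator in ['+', '*']:
--             problems.append((numbers, operator))
--
--     return problems
-- ===== SOURCE B (Python) =====
-- def parse_worksheet(lines):
--     """Parse worksheet left-to-right, numbers arranged vertically."""
--     max_len = max(len(line) for line in lines)
--     padded = [line.ljust(max_len) for line in lines]
--
--     problems = []
--
--     def flush(buf):
--         # buf holds the accumulated per-row text of one finished block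
--         numbers = []
--         for cell in buf[:-1]:
--             v = cell.strip()
--             if v:
--                 numbers.append(int(v))
--         op = buf[-1].strip()
--         if numbers and op in ('+', '*'):
--             problems.append((numbers, op))
--
--     # Single left-to-right pass: accumulate each block's row texts character
--     # by character in `buf`; a blank column finishes the current block.
--     buf = None
--     for c in range(max_len):
--         col = [line[c] for line in padded]
--         if all(ch == ' ' for ch in col):
--             if buf is not None:
--                 flush(buf)
--                 buf = None
--         else:
--             if buf is None:
--                 buf = [''] * len(padded)
--             buf = [b + ch for b, ch in zip(buf, col)]
--     if buf is not None:
--         flush(buf)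
--     return problems
-- ===== Notes on version B (the rewrite author's own statement) =====
-- stated objective: alternative
-- what changed: A finds (start,end) column spans with two interleaved while-loops and then re-reads the grid via line[start:end] slices; B never computes spans or slices at all: one left-to-right pass over the columns accumulates the current block's per-row text character by character in a buffer and flushes the buffer into a problem whenever an all-space column (or the end) is reached.
import Mathlib
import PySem

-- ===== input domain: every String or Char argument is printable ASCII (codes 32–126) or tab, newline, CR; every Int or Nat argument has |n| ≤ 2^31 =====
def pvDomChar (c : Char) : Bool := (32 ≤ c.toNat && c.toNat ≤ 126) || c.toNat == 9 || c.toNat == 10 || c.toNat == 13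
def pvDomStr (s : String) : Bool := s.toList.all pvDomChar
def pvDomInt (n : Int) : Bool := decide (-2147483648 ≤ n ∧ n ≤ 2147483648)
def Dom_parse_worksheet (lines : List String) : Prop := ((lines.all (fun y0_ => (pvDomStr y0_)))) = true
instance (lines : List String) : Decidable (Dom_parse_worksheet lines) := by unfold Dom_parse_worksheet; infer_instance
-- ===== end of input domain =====

-- B replaces A's span-finding while-loops and slicing by a single pass over the columns that
-- accumulates each block's per-row text in a buffer, flushed at every blank column (objective: alternative).

-- ===== shared helpers (both Pythons compute these same quantities with the same expressions) =====

-- max(len(line) for line in lines): running max over the lengths (Python max of a nonempty list; Pre_ excludes lines = [], where Python raises ValueError)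
def maxLenOf (lines : List String) : Nat := (lines.map fun s => s.toList.length).foldl max 0

-- line.ljust(max_len)
def pyLjust (cs : List Char) (n : Nat) : List Char := cs ++ List.replicate (n - cs.length) ' '

def paddedOf (lines : List String) : List (List Char) := lines.map fun s => pyLjust s.toList (maxLenOf lines)

-- all(line[col] == ' ' for line in padded_lines); the index is in range whenever col < max_len, so getD is exact there
def spCol (padded : List (List Char)) (c : Nat) : Bool := padded.all fun l => l.getD c ' ' == ' '

-- line[s:e].strip()
def cellOf (l : List Char) (s e : Int) : List Char := PySem.Chars.strip (PySem.List.slice l (some s) (some e))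

-- ===== PORT A =====

-- inner 'while col < max_len and all(...)' loop (fuel-guarded structural recursion;
-- fuel = max_len is enough since col strictly increases and the loop requires col < max_len)
def skipA (padded : List (List Char)) (maxLen : Nat) : Nat → Nat → Nat
  | 0, col => col
  | fuel + 1, col =>
      if col < maxLen ∧ spCol padded col = true then skipA padded maxLen fuel (col + 1) else col

-- inner 'while col < max_len and not all(...)' loop (same fuel guard)
def scanA (padded : List (List Char)) (maxLen : Nat) : Nat → Nat → Nat
  | 0, col => col
  | fuel + 1, col =>
      if col < maxLen ∧ spCol padded col = false then scanA padded maxLen fuel (col + 1) else col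

-- the block-extraction body of A's outer while loop
def extractA (padded : List (List Char)) (s e : Nat) (acc : List (List Int × String)) : List (List Int × String) :=
  let numbers := (padded.dropLast).foldl
    (fun ns l => if cellOf l (s : Int) (e : Int) ≠ [] then
        ns ++ [(PySem.Int.ofChars? (cellOf l (s : Int) (e : Int))).getD 0] else ns) []
  -- Pre_ guarantees ofChars? = some there (Python int() raises otherwise)
  let op := cellOf (padded.getLastD []) (s : Int) (e : Int)
  if numbers ≠ [] ∧ (op = ['+'] ∨ op = ['*']) then acc ++ [(numbers, String.ofList op)] else acc

-- A's outer while loop (fuel = max_len + 1 is enough: col strictly increases each iteration)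
def loopA (padded : List (List Char)) (maxLen : Nat) :
    Nat → Nat → List (List Int × String) → List (List Int × String)
  | 0, _, acc => acc
  | fuel + 1, col, acc =>
      if skipA padded maxLen maxLen col < maxLen then
        loopA padded maxLen fuel (scanA padded maxLen maxLen (skipA padded maxLen maxLen col))
          (extractA padded (skipA padded maxLen maxLen col)
            (scanA padded maxLen maxLen (skipA padded maxLen maxLen col)) acc)
      else acc

def parse_worksheet (lines : List String) : List (List Int × String) :=
  loopA (paddedOf lines) (maxLenOf lines) (maxLenOf lines + 1) 0 []

-- ===== PORT B =====

-- the nested 'def flush(buf)' of B: turn one finished block buffer into a problem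
def flushB (probs : List (List Int × String)) (buf : List (List Char)) : List (List Int × String) :=
  let numbers := (buf.dropLast).foldl
    (fun ns cell => if PySem.Chars.strip cell ≠ [] then
        ns ++ [(PySem.Int.ofChars? (PySem.Chars.strip cell)).getD 0] else ns) []
  -- Pre_ guarantees ofChars? = some there (Python int() raises otherwise)
  let op := PySem.Chars.strip (buf.getLastD [])
  if numbers ≠ [] ∧ (op = ['+'] ∨ op = ['*']) then probs ++ [(numbers, String.ofList op)] else probs

-- the body of B's 'for c in range(max_len)' loop; state = (problems, buf)
def stepB (padded : List (List Char)) (st : List (List Int × String) × Option (List (List Char)))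
    (c : Nat) : List (List Int × String) × Option (List (List Char)) :=
  -- col = [line[c] for line in padded]; the index is in range since c < max_len = len(line)
  if (padded.map fun l => l.getD c ' ').all (fun ch => ch == ' ') then
    match st with
    | (probs, some buf) => (flushB probs buf, none)
    | (probs, none) => (probs, none)
  else
    match st with
    | (probs, some b) =>
        (probs, some (List.zipWith (fun b' ch => b' ++ [ch]) b (padded.map fun l => l.getD c ' ')))
    | (probs, none) =>   -- buf = [''] * len(padded), then extended
        (probs, some (List.zipWith (fun b' ch => b' ++ [ch])
          (List.replicate padded.length ([] : List Char)) (padded.map fun l => l.getD c ' ')))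

def parse_worksheet_alt (lines : List String) : List (List Int × String) :=
  let padded := paddedOf lines
  let st := (List.range (maxLenOf lines)).foldl (stepB padded) ([], none)
  match st.2 with
  | some buf => flushB st.1 buf   -- trailing 'if buf is not None: flush(buf)'
  | none => st.1

-- ===== PRECONDITION & SPEC =====
-- Pre_ excludes exactly the inputs on which the Python A raises ValueError: the empty list
-- (max() of an empty sequence) and worksheets in which some cell of a problem block is
-- non-empty after strip() but not a valid int literal (int() raises).
def isRunB (padded : List (List Char)) (maxLen s e : Nat) : Bool :=
  decide (s < e) && (decide (s = 0) || spCol padded (s - 1)) &&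
    (decide (e = maxLen) || spCol padded e) &&
    ((List.range' s (e - s)).all fun c => ! spCol padded c)

def Pre_parse_worksheet (lines : List String) : Prop :=
  lines ≠ [] ∧
  ((List.range (maxLenOf lines)).all fun s =>
    (List.range (maxLenOf lines + 1)).all fun e =>
      ! isRunB (paddedOf lines) (maxLenOf lines) s e ||
      ((paddedOf lines).dropLast.all fun l =>
        decide (cellOf l (s : Int) (e : Int) = []) ||
        (PySem.Int.ofChars? (cellOf l (s : Int) (e : Int))).isSome)) = true
instance (lines : List String) : Decidable (Pre_parse_worksheet lines) := by
  unfold Pre_parse_worksheet; infer_instance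

def pvWitness_parse_worksheet : List String := ["1", "+"]

def Spec_parse_worksheet (lines : List String) (out : List (List Int × String)) : Prop :=
  out = parse_worksheet_alt lines
instance (lines : List String) (out : List (List Int × String)) : Decidable (Spec_parse_worksheet lines out) := by
  unfold Spec_parse_worksheet; infer_instance

-- ===== CLAIM (what is proved, stated in full; the proofs are below) =====
def Claim_equal_parse_worksheet : Prop :=
  ∀ (lines : List String), Dom_parse_worksheet lines → Pre_parse_worksheet lines →
    Spec_parse_worksheet lines (parse_worksheet lines)

-- ===== LEMMAS AND PROOFS =====

-- the final 'if buf is not None: flush(buf)' applied to a loop state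
def finishB (st : List (List Int × String) × Option (List (List Char))) : List (List Int × String) :=
  match st.2 with
  | some buf => flushB st.1 buf
  | none => st.1

-- the characters of line l in columns [s, i)
def seg (l : List Char) (s i : Nat) : List Char := (l.drop s).take (i - s)

theorem seg_self (l : List Char) (s : Nat) : seg l s s = [] := by simp [seg]

theorem seg_succ (l : List Char) (s i : Nat) (h1 : s ≤ i) (h2 : i < l.length) :
    seg l s (i + 1) = seg l s i ++ [l.getD i ' '] := by
  unfold seg
  have : i + 1 - s = (i - s) + 1 := by omega
  rw [this, List.take_succ, List.getElem?_drop]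
  have : s + (i - s) = i := by omega
  rw [this, List.getElem?_eq_getElem h2]
  simp [List.getD, List.getElem?_eq_getElem h2]

theorem seg_nil (s e : Nat) : seg ([] : List Char) s e = [] := by simp [seg]

-- each cell A extracts by slicing is the strip of the corresponding buffer segment
theorem cellOf_eq_seg (l : List Char) (s e : Nat) :
    cellOf l (s : Int) (e : Int) = PySem.Chars.strip (seg l s e) := by
  unfold cellOf seg
  rw [PySem.List.slice_natCast]

theorem getLastD_map_of_nil {α β : Type} (f : List α → List β) (hf : f [] = [])
    (l : List (List α)) : (l.map f).getLastD [] = f (l.getLastD []) := by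
  induction l with
  | nil => simp [hf]
  | cons x xs ih =>
    cases xs with
    | nil => simp
    | cons y ys => simpa using ih

-- flushing a buffer that holds the segments of columns [s, e) is exactly A's block extraction
theorem dropLast_map_eq {α β : Type} (f : α → β) (l : List α) :
    (l.map f).dropLast = l.dropLast.map f := by
  induction l with
  | nil => rfl
  | cons x xs ih =>
    cases xs with
    | nil => rfl
    | cons y ys =>
      simp only [List.map_cons, List.dropLast_cons₂] at ih ⊢
      exact congrArg (List.cons (f x)) ih

theorem flushB_eq_extractA (padded : List (List Char)) (s e : Nat) (probs : List (List Int × String)) :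
    flushB probs (padded.map fun l => seg l s e) = extractA padded s e probs := by
  unfold flushB extractA
  have hlast : ((padded.map fun l => seg l s e).getLastD []) = seg (padded.getLastD []) s e :=
    getLastD_map_of_nil _ (seg_nil s e) padded
  rw [hlast, dropLast_map_eq, List.foldl_map]
  simp only [cellOf_eq_seg]

theorem zipWith_map_same {α β γ δ : Type} (f : β → γ → δ) (g : α → β) (h : α → γ) (l : List α) :
    List.zipWith f (l.map g) (l.map h) = l.map fun x => f (g x) (h x) := by
  induction l with
  | nil => rfl
  | cons x xs ih => simp [ih]

theorem replicate_eq_map_nil {α β : Type} (l : List α) :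
    List.replicate l.length ([] : List β) = l.map fun _ => [] := by
  induction l with
  | nil => rfl
  | cons x xs ih =>
    simp only [List.length_cons, List.replicate_succ, List.map_cons]
    rw [ih]

-- B's blank-column test is A's spCol
theorem colAll_eq_spCol (padded : List (List Char)) (c : Nat) :
    ((padded.map fun l => l.getD c ' ').all fun ch => ch == ' ') = spCol padded c := by
  simp [spCol, List.all_map, Function.comp_def]

-- facts about the fuelled inner loops (fuel = max_len always suffices)
theorem skipA_ge (padded : List (List Char)) (maxLen : Nat) :
    ∀ (fuel col : Nat), col ≤ skipA padded maxLen fuel col := by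
  intro fuel
  induction fuel with
  | zero => intro col; simp [skipA]
  | succ f ih =>
    intro col
    simp only [skipA]
    split_ifs with h
    · exact le_trans (Nat.le_succ col) (ih (col + 1))
    · exact le_refl col

theorem skipA_post (padded : List (List Char)) (maxLen : Nat) :
    ∀ (fuel col : Nat), maxLen ≤ fuel + col → skipA padded maxLen fuel col < maxLen →
      spCol padded (skipA padded maxLen fuel col) = false := by
  intro fuel
  induction fuel with
  | zero =>
    intro col hf h
    simp only [skipA] at h
    omega
  | succ f ih =>
    intro col hf h
    simp only [skipA] at h ⊢
    split_ifs at h ⊢ with hc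
    · exact ih (col + 1) (by omega) h
    · rcases Bool.eq_false_or_eq_true (spCol padded col) with hb | hb
      · exact absurd ⟨h, hb⟩ hc
      · exact hb

theorem scanA_ge (padded : List (List Char)) (maxLen : Nat) :
    ∀ (fuel col : Nat), col ≤ scanA padded maxLen fuel col := by
  intro fuel
  induction fuel with
  | zero => intro col; simp [scanA]
  | succ f ih =>
    intro col
    simp only [scanA]
    split_ifs with h
    · exact le_trans (Nat.le_succ col) (ih (col + 1))
    · exact le_refl col

theorem scanA_stop (padded : List (List Char)) (maxLen i : Nat)
    (h : ¬ (i < maxLen ∧ spCol padded i = false)) :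
    ∀ fuel, scanA padded maxLen fuel i = i := by
  intro fuel
  cases fuel with
  | zero => rfl
  | succ f => simp only [scanA, if_neg h]

theorem scanA_fuel_succ (padded : List (List Char)) (maxLen : Nat) :
    ∀ (fuel col : Nat), maxLen ≤ fuel + col →
      scanA padded maxLen (fuel + 1) col = scanA padded maxLen fuel col := by
  intro fuel
  induction fuel with
  | zero =>
    intro col hf
    have : ¬ (col < maxLen ∧ spCol padded col = false) := by omega
    simp only [scanA, if_neg this]
  | succ f ih =>
    intro col hf
    by_cases hc : col < maxLen ∧ spCol padded col = false
    · show scanA padded maxLen (f + 1 + 1) col = scanA padded maxLen (f + 1) col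
      conv_lhs => rw [scanA, if_pos hc]
      conv_rhs => rw [scanA, if_pos hc]
      exact ih (col + 1) (by omega)
    · rw [scanA_stop padded maxLen col hc, scanA_stop padded maxLen col hc]

-- one step of the canonical (fuel = max_len) scan
theorem scanA_canon_step (padded : List (List Char)) (maxLen i : Nat)
    (h1 : i < maxLen) (h2 : spCol padded i = false) :
    scanA padded maxLen maxLen i = scanA padded maxLen maxLen (i + 1) := by
  obtain ⟨m, rfl⟩ : ∃ m, maxLen = m + 1 := ⟨maxLen - 1, by omega⟩
  conv_lhs => rw [scanA, if_pos ⟨h1, h2⟩]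
  exact (scanA_fuel_succ padded (m + 1) m (i + 1) (by omega)).symm

theorem scanA_canon_gt (padded : List (List Char)) (maxLen i : Nat)
    (h1 : i < maxLen) (h2 : spCol padded i = false) :
    i < scanA padded maxLen maxLen i := by
  rw [scanA_canon_step padded maxLen i h1 h2]
  exact Nat.lt_of_lt_of_le (Nat.lt_succ_self i) (scanA_ge padded maxLen maxLen (i + 1))

-- the (start, end) column runs A's outer loop visits, starting at column i
def runsC (padded : List (List Char)) (maxLen i : Nat) : List (Nat × Nat) :=
  if h : i < maxLen then
    if hs : spCol padded i = true then runsC padded maxLen (i + 1)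
    else (i, scanA padded maxLen maxLen i) :: runsC padded maxLen (scanA padded maxLen maxLen i)
  else []
termination_by maxLen - i
decreasing_by
  · omega
  · have := scanA_canon_gt padded maxLen i h (by simpa using hs); omega

theorem runsC_stop (padded : List (List Char)) (maxLen i : Nat) (h : ¬ i < maxLen) :
    runsC padded maxLen i = [] := by
  rw [runsC.eq_def, dif_neg h]

theorem runsC_space (padded : List (List Char)) (maxLen i : Nat)
    (h1 : i < maxLen) (h2 : spCol padded i = true) :
    runsC padded maxLen i = runsC padded maxLen (i + 1) := by
  rw [runsC.eq_def, dif_pos h1, dif_pos h2]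

theorem runsC_nonspace (padded : List (List Char)) (maxLen i : Nat)
    (h1 : i < maxLen) (h2 : spCol padded i = false) :
    runsC padded maxLen i =
      (i, scanA padded maxLen maxLen i) :: runsC padded maxLen (scanA padded maxLen maxLen i) := by
  rw [runsC.eq_def, dif_pos h1, dif_neg (by simp [h2])]

theorem runsC_skip (padded : List (List Char)) (maxLen : Nat) :
    ∀ (fuel col : Nat), runsC padded maxLen (skipA padded maxLen fuel col) = runsC padded maxLen col := by
  intro fuel
  induction fuel with
  | zero => intro col; rfl
  | succ f ih =>
    intro col
    simp only [skipA]
    split_ifs with h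
    · rw [ih (col + 1), runsC_space padded maxLen col h.1 h.2]
    · rfl

-- A's loop is the fold of extractA over the run list (given enough fuel)
theorem loopA_eq_foldl (padded : List (List Char)) (maxLen : Nat) :
    ∀ (fuel col : Nat) (acc : List (List Int × String)), maxLen ≤ fuel + col →
      loopA padded maxLen fuel col acc =
        (runsC padded maxLen col).foldl (fun a r => extractA padded r.1 r.2 a) acc := by
  intro fuel
  induction fuel with
  | zero =>
    intro col acc hf
    rw [runsC_stop padded maxLen col (by omega)]
    rfl
  | succ f ih =>
    intro col acc hf
    simp only [loopA]
    split_ifs with h1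
    · have hsp := skipA_post padded maxLen maxLen col (by omega) h1
      have hsge := skipA_ge padded maxLen maxLen col
      have hegt := scanA_canon_gt padded maxLen _ h1 hsp
      rw [← runsC_skip padded maxLen maxLen col, runsC_nonspace padded maxLen _ h1 hsp,
        List.foldl_cons]
      exact ih _ _ (by omega)
    · rw [← runsC_skip padded maxLen maxLen col, runsC_stop padded maxLen _ h1]
      rfl

-- stepB's two transitions, made explicit
theorem stepB_blank_none (padded : List (List Char)) (c : Nat) (probs : List (List Int × String))
    (hb : spCol padded c = true) : stepB padded (probs, none) c = (probs, none) := by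
  unfold stepB
  rw [colAll_eq_spCol, hb]
  simp

theorem stepB_blank_some (padded : List (List Char)) (c : Nat) (probs : List (List Int × String))
    (buf : List (List Char)) (hb : spCol padded c = true) :
    stepB padded (probs, some buf) c = (flushB probs buf, none) := by
  unfold stepB
  rw [colAll_eq_spCol, hb]
  simp

theorem stepB_text_none (padded : List (List Char)) (c : Nat) (probs : List (List Int × String))
    (hb : spCol padded c = false) (hrect : ∀ l ∈ padded, c < l.length) :
    stepB padded (probs, none) c = (probs, some (padded.map fun l => seg l c (c + 1))) := by
  unfold stepB
  rw [colAll_eq_spCol, hb]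
  simp only [Bool.false_eq_true, if_false]
  rw [replicate_eq_map_nil, zipWith_map_same]
  congr 2
  apply List.map_congr_left
  intro l hl
  rw [seg_succ l c c (le_refl c) (hrect l hl), seg_self]

theorem stepB_text_some (padded : List (List Char)) (c s : Nat) (probs : List (List Int × String))
    (hb : spCol padded c = false) (hs : s ≤ c) (hrect : ∀ l ∈ padded, c < l.length) :
    stepB padded (probs, some (padded.map fun l => seg l s c)) c
      = (probs, some (padded.map fun l => seg l s (c + 1))) := by
  unfold stepB
  rw [colAll_eq_spCol, hb]
  simp only [Bool.false_eq_true, if_false]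
  rw [zipWith_map_same]
  congr 2
  apply List.map_congr_left
  intro l hl
  rw [seg_succ l s c hs (hrect l hl)]

-- the single-pass fold computes exactly the fold of extractA over A's run list
theorem foldB_inv (padded : List (List Char)) (maxLen : Nat)
    (hrect : ∀ l ∈ padded, l.length = maxLen) :
    ∀ (n i : Nat), i + n = maxLen → ∀ (probs : List (List Int × String)),
      (finishB ((List.range' i n).foldl (stepB padded) (probs, none))
        = (runsC padded maxLen i).foldl (fun a r => extractA padded r.1 r.2 a) probs) ∧
      (∀ s : Nat, s ≤ i →
        finishB ((List.range' i n).foldl (stepB padded) (probs, some (padded.map fun l => seg l s i)))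
          = ((s, scanA padded maxLen maxLen i) :: runsC padded maxLen (scanA padded maxLen maxLen i)).foldl
              (fun a r => extractA padded r.1 r.2 a) probs) := by
  intro n
  induction n with
  | zero =>
    intro i hi probs
    have hnl : ¬ i < maxLen := by omega
    constructor
    · simp [finishB, runsC_stop padded maxLen i hnl]
    · intro s _
      have h1 : scanA padded maxLen maxLen i = i := scanA_stop padded maxLen i (by simp [hnl]) maxLen
      simp only [List.range'_zero, List.foldl_nil, finishB, h1,
        runsC_stop padded maxLen i hnl, List.foldl_cons, List.foldl_nil]
      exact flushB_eq_extractA padded s i probs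
  | succ n ih =>
    intro i hi probs
    have hlt : i < maxLen := by omega
    have hin : ∀ l ∈ padded, i < l.length := fun l hl => by rw [hrect l hl]; omega
    have ih' := ih (i + 1) (by omega)
    rw [List.range'_succ]
    simp only [List.foldl_cons]
    cases hb : spCol padded i with
    | false =>
      have hscan : scanA padded maxLen maxLen i = scanA padded maxLen maxLen (i + 1) :=
        scanA_canon_step padded maxLen i hlt hb
      constructor
      · rw [stepB_text_none padded i probs hb hin, (ih' probs).2 i (by omega),
          runsC_nonspace padded maxLen i hlt hb, hscan]
      · intro s hs
        rw [stepB_text_some padded i s probs hb hs hin, (ih' probs).2 s (by omega), hscan]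
        simp only [List.foldl_cons]
    | true =>
      have hscan : scanA padded maxLen maxLen i = i := scanA_stop padded maxLen i (by simp [hb]) maxLen
      constructor
      · rw [stepB_blank_none padded i probs hb, (ih' probs).1,
          runsC_space padded maxLen i hlt hb]
      · intro s hs
        rw [stepB_blank_some padded i probs _ hb, flushB_eq_extractA padded s i probs,
          (ih' _).1, hscan, runsC_space padded maxLen i hlt hb]

-- every padded line has length max_len
theorem le_foldl_max (l : List Nat) : ∀ b : Nat, b ≤ l.foldl max b := by
  induction l with
  | nil => intro b; simp
  | cons x xs ih =>
    intro b
    exact le_trans (le_max_left b x) (by simpa using ih (max b x))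

theorem mem_le_foldl_max (l : List Nat) : ∀ (b a : Nat), a ∈ l → a ≤ l.foldl max b := by
  induction l with
  | nil => intro b a h; cases h
  | cons x xs ih =>
    intro b a h
    rcases List.mem_cons.mp h with rfl | h
    · exact le_trans (le_max_right b a) (le_foldl_max xs (max b a))
    · exact ih (max b x) a h

theorem padded_rect (lines : List String) :
    ∀ l ∈ paddedOf lines, l.length = maxLenOf lines := by
  intro l hl
  rcases List.mem_map.mp hl with ⟨s, hs, rfl⟩
  have : s.toList.length ≤ maxLenOf lines :=
    mem_le_foldl_max _ 0 _ (List.mem_map.mpr ⟨s, hs, rfl⟩)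
  simp only [pyLjust, List.length_append, List.length_replicate]
  omega

-- ===== VERDICT (by name: the statement is the Claim_ definition above) =====
theorem parse_worksheet_spec : Claim_equal_parse_worksheet := by
  intro lines _hDom _hPre
  unfold Spec_parse_worksheet parse_worksheet
  rw [loopA_eq_foldl (paddedOf lines) (maxLenOf lines) (maxLenOf lines + 1) 0 [] (by omega)]
  have halt : parse_worksheet_alt lines
      = finishB ((List.range (maxLenOf lines)).foldl (stepB (paddedOf lines)) ([], none)) := rfl
  have h := (foldB_inv (paddedOf lines) (maxLenOf lines) (padded_rect lines)
      (maxLenOf lines) 0 (by omega) []).1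
  rw [halt, List.range_eq_range', h]
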